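-- pv_equiv track=rewrite | github.com/shirinmhb/tic-tac-toe | tic-tac-toe.py | count_corner
-- ===== SOURCE A (Python) =====
-- def count_corner(stateBoard, player):
--   f = 0
--   #check rows
--   for i in range(3):
--     if (stateBoard[i][2] ==player):
--       f += 1
--     if (stateBoard[i][0] ==player):
--       f += 1
--
--   #check columns
--   for i in range(3):
--     if (stateBoard[2][i] ==player):
--       f += 1
--     if (stateBoard[0][i] ==player):
--       f += 1
--
--   return f
-- ===== SOURCE B (Python) =====
-- def count_corner(stateBoard, player):
--   weights = [[2, 1, 2], [1, 0, 1], [2, 1, 2]]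
--   return sum(weights[i][j] for i in range(3) for j in range(3)
--              if stateBoard[i][j] == player)
-- ===== Notes on version B (the rewrite author's own statement) =====
-- stated objective: idiomatic
-- what changed: Replaces A's two separate perimeter loops (rows hitting columns 0/2, columns hitting rows 0/2, double-counting corners) by a single weighted pass over all nine cells, summing weights[i][j] from the 3x3 matrix [[2,1,2],[1,0,1],[2,1,2]] wherever stateBoard[i][j] == player.
import Mathlib
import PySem

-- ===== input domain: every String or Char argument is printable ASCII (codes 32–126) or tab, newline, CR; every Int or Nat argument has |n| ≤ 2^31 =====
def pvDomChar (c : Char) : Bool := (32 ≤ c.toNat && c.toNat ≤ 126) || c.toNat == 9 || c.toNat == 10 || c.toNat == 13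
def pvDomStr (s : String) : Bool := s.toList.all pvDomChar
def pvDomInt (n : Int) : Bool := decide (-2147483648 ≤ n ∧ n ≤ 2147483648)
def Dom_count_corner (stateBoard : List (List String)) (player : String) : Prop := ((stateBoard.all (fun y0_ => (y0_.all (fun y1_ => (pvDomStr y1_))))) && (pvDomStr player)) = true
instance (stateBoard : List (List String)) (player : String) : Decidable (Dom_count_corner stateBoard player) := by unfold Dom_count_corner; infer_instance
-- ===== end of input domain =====

-- B is a single weighted pass (zip with a 3x3 weight matrix) instead of A's two perimeter loops; equivalence on boards with at least 3 rows of at least 3 cells.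

-- ===== PORT A =====
-- stateBoard[i][j]; default is irrelevant: Pre_ keeps every access in range.
def pvCell (b : List (List String)) (i j : Int) : String :=
  (PySem.List.pyGet? ((PySem.List.pyGet? b i).getD []) j).getD ""

def count_corner (stateBoard : List (List String)) (player : String) : Int :=
  let f : Int := 0
  -- check rows
  let f := (PySem.List.pyRange 0 3 1).foldl (fun f i =>
    let f := if pvCell stateBoard i 2 == player then f + 1 else f
    if pvCell stateBoard i 0 == player then f + 1 else f) f
  -- check columns
  let f := (PySem.List.pyRange 0 3 1).foldl (fun f i =>
    let f := if pvCell stateBoard 2 i == player then f + 1 else f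
    if pvCell stateBoard 0 i == player then f + 1 else f) f
  f

-- ===== PORT B =====
def pvWeights : List (List Int) := [[2, 1, 2], [1, 0, 1], [2, 1, 2]]

-- weights[i][j]; every access is in range (3x3 literal matrix, 0 ≤ i, j < 3)
def pvWeight (i j : Int) : Int :=
  (PySem.List.pyGet? ((PySem.List.pyGet? pvWeights i).getD []) j).getD 0

def count_corner_alt (stateBoard : List (List String)) (player : String) : Int :=
  ((PySem.List.pyRange 0 3 1).flatMap (fun i =>
    (PySem.List.pyRange 0 3 1).filterMap (fun j =>
      if pvCell stateBoard i j == player then some (pvWeight i j) else none))).sum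

-- ===== PRECONDITION & SPEC =====
-- A indexes rows 0..2 and columns 0..2: it raises IndexError unless there are at
-- least 3 rows and each of the first three rows has at least 3 cells.
def Pre_count_corner (stateBoard : List (List String)) (player : String) : Prop :=
  3 ≤ stateBoard.length ∧ ∀ r ∈ stateBoard.take 3, 3 ≤ r.length
instance (stateBoard : List (List String)) (player : String) : Decidable (Pre_count_corner stateBoard player) := by unfold Pre_count_corner; infer_instance

def pvWitness_count_corner : List (List String) × String :=
  ([["X", "O", "X"], ["O", "X", "O"], ["X", "O", "X"]], "X")

def Spec_count_corner (stateBoard : List (List String)) (player : String) (out : Int) : Prop := out = count_corner_alt stateBoard player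
instance (stateBoard : List (List String)) (player : String) (out : Int) : Decidable (Spec_count_corner stateBoard player out) := by unfold Spec_count_corner; infer_instance

-- ===== CLAIM (what is proved, stated in full; the proofs are below) =====
def Claim_equal_count_corner : Prop := ∀ (stateBoard : List (List String)) (player : String), Dom_count_corner stateBoard player → Pre_count_corner stateBoard player → Spec_count_corner stateBoard player (count_corner stateBoard player)


-- ===== LEMMAS AND PROOFS =====

theorem pvRange3 : PySem.List.pyRange 0 3 1 = [0, 1, 2] := by decide

theorem pvGet2 {α : Type} (x0 x1 x2 : α) (t : List α) :
    PySem.List.pyGet? (x0 :: x1 :: x2 :: t) (2 : Int) = some x2 := by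
  simp [PySem.List.pyGet?, PySem.List.pyIdx?]
  rw [if_pos (by omega)]
  simp

theorem pvGet1 {α : Type} (x0 x1 x2 : α) (t : List α) :
    PySem.List.pyGet? (x0 :: x1 :: x2 :: t) (1 : Int) = some x1 := by
  simp [PySem.List.pyGet?, PySem.List.pyIdx?]
  rw [if_pos (by omega)]
  simp

theorem pvGet0 {α : Type} (x0 x1 x2 : α) (t : List α) :
    PySem.List.pyGet? (x0 :: x1 :: x2 :: t) (0 : Int) = some x0 := by
  simp [PySem.List.pyGet?, PySem.List.pyIdx?]
  rw [if_pos (by omega)]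
  simp

theorem pvIte (c : Prop) [Decidable c] (f : Int) :
    (if c then f + 1 else f) = f + (if c then 1 else 0) := by
  split_ifs <;> omega

theorem pvSumFM {α : Type} (f : α → Option Int) (x : α) (xs : List α) :
    (List.filterMap f (x :: xs)).sum = (f x).getD 0 + (List.filterMap f xs).sum := by
  cases h : f x <;> simp [h]

theorem pvIteGetD (c : Prop) [Decidable c] (w : Int) :
    (if c then some w else none).getD 0 = if c then w else 0 := by
  split_ifs <;> rfl

-- ===== VERDICT (by name: the statement is the Claim_ definition above) =====
set_option maxHeartbeats 1000000 in
theorem count_corner_spec : Claim_equal_count_corner := by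
  intro b p _ hpre
  obtain ⟨hlen, hrows⟩ := hpre
  match b, hlen with
  | r0 :: r1 :: r2 :: rest, _ =>
    have h0 : 3 ≤ r0.length := hrows r0 (by simp)
    have h1 : 3 ≤ r1.length := hrows r1 (by simp)
    have h2 : 3 ≤ r2.length := hrows r2 (by simp)
    match r0, h0, r1, h1, r2, h2 with
    | a0 :: a1 :: a2 :: t0, _, b0 :: b1 :: b2 :: t1, _, c0 :: c1 :: c2 :: t2, _ =>
      unfold Spec_count_corner count_corner count_corner_alt pvWeight pvWeights pvCell
      rw [pvRange3]
      simp only [List.foldl, pvGet0, pvGet1, pvGet2, Option.getD_some, pvIte,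
        List.flatMap_cons, List.flatMap_nil, List.sum_append, List.append_nil,
        pvSumFM, List.filterMap_nil, List.sum_nil, pvIteGetD]
      split_ifs <;> omega
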